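-- pv_equiv track=rewrite | github.com/sa-as31/smapo_ros2 | web_demo/task_runtime.py | expand_starts
-- ===== SOURCE A (Python) =====
-- from typing import Any, Deque, Dict, List, Optional, Tuple
--
-- def expand_starts(base_starts: List[Tuple[int, int, int, int]], num_agents: int, height: int, width: int) -> List[Tuple[int, int, int, int]]:
--     starts = []
--     offset = 0
--     while len(starts) < num_agents:
--         sx, sy, tx, ty = base_starts[len(starts) % len(base_starts)]
--         shift = offset // len(base_starts)
--         nx = max(1, min(height - 2, sx + (shift % 3) - 1))
--         ny = max(1, min(width - 2, sy + ((shift + 1) % 3) - 1))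
--         gx = max(1, min(height - 2, tx - (shift % 2)))
--         gy = max(1, min(width - 2, ty - ((shift + 1) % 2)))
--         starts.append((nx, ny, gx, gy))
--         offset += 1
--     return starts
-- ===== SOURCE B (Python) =====
-- from typing import List, Tuple
--
-- def expand_starts(base_starts: List[Tuple[int, int, int, int]], num_agents: int, height: int, width: int) -> List[Tuple[int, int, int, int]]:
--     if num_agents <= 0:
--         return []
--     # The perturbation depends on `shift` only through shift % 3 and shift % 2,
--     # so the whole output sequence is periodic with period 6 * len(base_starts).
--     # Precompute one full period as a table, tile it, and slice.
--     table = [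
--         (max(1, min(height - 2, sx + (shift % 3) - 1)),
--          max(1, min(width - 2, sy + ((shift + 1) % 3) - 1)),
--          max(1, min(height - 2, tx - (shift % 2))),
--          max(1, min(width - 2, ty - ((shift + 1) % 2))))
--         for shift in range(6)
--         for (sx, sy, tx, ty) in base_starts
--     ]
--     reps = num_agents // len(table) + 1
--     return (table * reps)[:num_agents]
-- ===== Notes on version B (the rewrite author's own statement) =====
-- stated objective: faster
-- what changed: Exploits that the output is periodic with period 6*len(base_starts): B precomputes that one period as a table with a comprehension, tiles it by list multiplication and slices to num_agents, instead of A's per-agent while-loop decoding each index by modulo and floor division; the per-agent clamp arithmetic is amortized into one period.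
import Mathlib
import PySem

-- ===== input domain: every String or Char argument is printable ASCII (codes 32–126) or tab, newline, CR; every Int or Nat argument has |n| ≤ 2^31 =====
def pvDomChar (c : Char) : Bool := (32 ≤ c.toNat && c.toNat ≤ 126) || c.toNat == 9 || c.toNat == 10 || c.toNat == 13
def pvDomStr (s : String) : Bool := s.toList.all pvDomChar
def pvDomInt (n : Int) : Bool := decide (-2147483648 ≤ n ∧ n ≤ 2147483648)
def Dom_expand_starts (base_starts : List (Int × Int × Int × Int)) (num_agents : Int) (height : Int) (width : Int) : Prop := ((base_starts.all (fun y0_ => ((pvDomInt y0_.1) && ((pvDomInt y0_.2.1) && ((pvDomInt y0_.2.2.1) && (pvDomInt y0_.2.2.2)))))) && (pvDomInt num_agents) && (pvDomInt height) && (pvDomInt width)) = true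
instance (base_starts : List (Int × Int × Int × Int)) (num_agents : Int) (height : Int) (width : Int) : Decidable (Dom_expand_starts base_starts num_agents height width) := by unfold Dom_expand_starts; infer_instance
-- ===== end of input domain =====

-- B exploits that the output is periodic with period 6*len(base_starts): it precomputes one
-- period as a table, tiles it and slices to num_agents, instead of A's per-agent while-loop
-- with modulo/floor-division index decoding (objective: faster by a constant factor, measured).

-- shared clamp arithmetic (identical formulas in both Python sources)
def pvShiftTuple (height width : Int) (p : Int × Int × Int × Int) (shift : Int) : Int × Int × Int × Int :=
  (max 1 (min (height - 2) (p.1 + PySem.Int.mod shift 3 - 1)),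
   max 1 (min (width - 2) (p.2.1 + PySem.Int.mod (shift + 1) 3 - 1)),
   max 1 (min (height - 2) (p.2.2.1 - PySem.Int.mod shift 2)),
   max 1 (min (width - 2) (p.2.2.2 - PySem.Int.mod (shift + 1) 2)))

-- ===== PORT A =====
-- while len(starts) < num_agents: index base by len(starts) % len(base), shift = offset // len(base).
-- The while-loop is ported as structural recursion on fuel = num_agents.toNat (the loop appends
-- one tuple per iteration, so it iterates exactly that often); the guard is the Python guard.
-- Python raises (ZeroDivisionError) when base_starts = [] and num_agents > 0: excluded by Pre_.
def expand_starts_loop (base_starts : List (Int × Int × Int × Int)) (num_agents height width : Int) :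
    Nat → List (Int × Int × Int × Int) → Int → List (Int × Int × Int × Int)
  | 0, starts, _ => starts
  | fuel + 1, starts, offset =>
    if (starts.length : Int) < num_agents then
      let p := PySem.List.pyGetD base_starts (PySem.Int.mod (starts.length : Int) (base_starts.length : Int)) (0, 0, 0, 0)
      let shift := PySem.Int.floordiv offset (base_starts.length : Int)
      expand_starts_loop base_starts num_agents height width fuel (starts ++ [pvShiftTuple height width p shift]) (offset + 1)
    else starts

def expand_starts (base_starts : List (Int × Int × Int × Int)) (num_agents : Int) (height : Int) (width : Int) : List (Int × Int × Int × Int) :=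
  expand_starts_loop base_starts num_agents height width num_agents.toNat [] 0

-- ===== PORT B =====
-- if num_agents <= 0: return [];  table = one full period (comprehension: shift in range(6),
-- entry in base_starts);  reps = num_agents // len(table) + 1;  return (table * reps)[:num_agents].
-- 'table * reps' is flatten (replicate …); the slice is PySem.List.slice.
-- Python raises ZeroDivisionError when base_starts = [] and num_agents > 0 (len(table) = 0): excluded by Pre_.
def expand_starts_alt (base_starts : List (Int × Int × Int × Int)) (num_agents : Int) (height : Int) (width : Int) : List (Int × Int × Int × Int) :=
  if num_agents ≤ 0 then []
  else
    let table := (PySem.List.pyRange 0 6 1).flatMap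
      (fun shift => base_starts.map (fun p => pvShiftTuple height width p shift))
    let reps := PySem.Int.floordiv num_agents (table.length : Int) + 1
    PySem.List.slice (List.flatten (List.replicate reps.toNat table)) none (some num_agents)

-- ===== PRECONDITION & SPEC =====
-- Pre_ excludes base_starts = [] with num_agents > 0, where A raises ZeroDivisionError.
def Pre_expand_starts (base_starts : List (Int × Int × Int × Int)) (num_agents : Int) (height : Int) (width : Int) : Prop :=
  num_agents ≤ 0 ∨ base_starts ≠ []
instance (base_starts : List (Int × Int × Int × Int)) (num_agents : Int) (height : Int) (width : Int) : Decidable (Pre_expand_starts base_starts num_agents height width) := by unfold Pre_expand_starts; infer_instance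

def pvWitness_expand_starts : (List (Int × Int × Int × Int)) × Int × Int × Int := ([(2, 2, 4, 4), (1, 3, 2, 2)], 5, 8, 8)

def Spec_expand_starts (base_starts : List (Int × Int × Int × Int)) (num_agents : Int) (height : Int) (width : Int) (out : List (Int × Int × Int × Int)) : Prop := out = expand_starts_alt base_starts num_agents height width
instance (base_starts : List (Int × Int × Int × Int)) (num_agents : Int) (height : Int) (width : Int) (out : List (Int × Int × Int × Int)) : Decidable (Spec_expand_starts base_starts num_agents height width out) := by unfold Spec_expand_starts; infer_instance

-- ===== CLAIM (what is proved, stated in full; the proofs are below) =====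
def Claim_equal_expand_starts : Prop := ∀ (base_starts : List (Int × Int × Int × Int)) (num_agents : Int) (height : Int) (width : Int), Dom_expand_starts base_starts num_agents height width → Pre_expand_starts base_starts num_agents height width → Spec_expand_starts base_starts num_agents height width (expand_starts base_starts num_agents height width)

-- ===== LEMMAS AND PROOFS =====

-- the i-th produced tuple (0-based), as both programs compute it
def pvElem (base_starts : List (Int × Int × Int × Int)) (height width : Int) (i : Nat) : Int × Int × Int × Int :=
  pvShiftTuple height width (base_starts.getD (i % base_starts.length) (0, 0, 0, 0)) ((i / base_starts.length : Nat) : Int)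

def pvBuild (base_starts : List (Int × Int × Int × Int)) (height width : Int) (i k : Nat) : List (Int × Int × Int × Int) :=
  (List.range k).map (fun j => pvElem base_starts height width (i + j))

lemma pvBuild_succ (b : List (Int × Int × Int × Int)) (hh ww : Int) (i k : Nat) :
    pvBuild b hh ww i (k + 1) = pvElem b hh ww i :: pvBuild b hh ww (i + 1) k := by
  simp [pvBuild, List.range_succ_eq_map, List.map_map]
  intro j _
  congr 1
  omega

lemma pvBuild_add (b : List (Int × Int × Int × Int)) (hh ww : Int) (i a c : Nat) :
    pvBuild b hh ww i (a + c) = pvBuild b hh ww i a ++ pvBuild b hh ww (i + a) c := by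
  simp [pvBuild, List.range_add, List.map_map]
  intro j _
  congr 1
  omega

lemma expand_starts_loop_eq (b : List (Int × Int × Int × Int)) (hb : b ≠ []) (N hh ww : Int) :
    ∀ (fuel : Nat) (starts : List (Int × Int × Int × Int)), (N - starts.length).toNat ≤ fuel →
      expand_starts_loop b N hh ww fuel starts starts.length =
        starts ++ pvBuild b hh ww starts.length ((N - starts.length).toNat) := by
  intro fuel
  induction fuel with
  | zero =>
    intro starts hk
    have h0 : (N - (starts.length : Int)).toNat = 0 := by omega
    simp [expand_starts_loop, h0, pvBuild]
  | succ fuel ih =>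
    intro starts hk
    have hL : 0 < b.length := List.length_pos_of_ne_nil hb
    rw [expand_starts_loop]
    by_cases hlt : (starts.length : Int) < N
    · simp only [hlt, if_pos]
      have hx : PySem.List.pyGetD b (PySem.Int.mod (starts.length : Int) (b.length : Int)) (0, 0, 0, 0)
          = b.getD (starts.length % b.length) (0, 0, 0, 0) := by
        rw [PySem.Int.mod_natCast, PySem.List.pyGetD_natCast]
      have hs : PySem.Int.floordiv (starts.length : Int) (b.length : Int)
          = ((starts.length / b.length : Nat) : Int) := PySem.Int.floordiv_natCast _ _
      rw [hx, hs]
      have harg : ((starts.length : Int) + 1) = (((starts ++ [pvShiftTuple hh ww (b.getD (starts.length % b.length) (0,0,0,0)) ((starts.length / b.length : Nat) : Int)]).length : Int)) := by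
        simp
      rw [harg, ih _ (by simp; omega)]
      have hsucc : (N - (starts.length : Int)).toNat = ((N - ((starts.length : Int) + 1)).toNat) + 1 := by
        omega
      simp only [List.length_append, List.length_cons, List.length_nil, Nat.zero_add,
        Nat.cast_add, Nat.cast_one]
      rw [hsucc, pvBuild_succ]
      simp [pvElem]
    · have h0 : (N - (starts.length : Int)).toNat = 0 := by omega
      simp [hlt, h0, pvBuild]

-- the perturbation depends on shift only through shift % 3 and shift % 2, so it has period 6
lemma pvShiftTuple_period (hh ww : Int) (p : Int × Int × Int × Int) (s : Int) :
    pvShiftTuple hh ww p (s + 6) = pvShiftTuple hh ww p s := by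
  have e1 : PySem.Int.mod (s + 6) 3 = PySem.Int.mod s 3 := by
    rw [PySem.Int.mod_eq_emod_of_pos (by omega), PySem.Int.mod_eq_emod_of_pos (by omega)]; omega
  have e2 : PySem.Int.mod (s + 6 + 1) 3 = PySem.Int.mod (s + 1) 3 := by
    rw [PySem.Int.mod_eq_emod_of_pos (by omega), PySem.Int.mod_eq_emod_of_pos (by omega)]; omega
  have e3 : PySem.Int.mod (s + 6) 2 = PySem.Int.mod s 2 := by
    rw [PySem.Int.mod_eq_emod_of_pos (by omega), PySem.Int.mod_eq_emod_of_pos (by omega)]; omega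
  have e4 : PySem.Int.mod (s + 6 + 1) 2 = PySem.Int.mod (s + 1) 2 := by
    rw [PySem.Int.mod_eq_emod_of_pos (by omega), PySem.Int.mod_eq_emod_of_pos (by omega)]; omega
  simp only [pvShiftTuple, e1, e2, e3, e4]

lemma pvElem_period (b : List (Int × Int × Int × Int)) (hb : b ≠ []) (hh ww : Int) (i : Nat) :
    pvElem b hh ww (i + 6 * b.length) = pvElem b hh ww i := by
  have hL : 0 < b.length := List.length_pos_of_ne_nil hb
  have hm : (i + 6 * b.length) % b.length = i % b.length := by
    rw [show i + 6 * b.length = i + b.length * 6 by ring, Nat.add_mul_mod_self_left]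
  have hd : (i + 6 * b.length) / b.length = i / b.length + 6 := by
    rw [show i + 6 * b.length = i + b.length * 6 by ring, Nat.add_mul_div_left _ _ hL]
  simp only [pvElem, hm, hd]
  rw [show ((i / b.length + 6 : Nat) : Int) = ((i / b.length : Nat) : Int) + 6 by push_cast; ring]
  exact pvShiftTuple_period hh ww _ _

lemma pvBuild_period (b : List (Int × Int × Int × Int)) (hb : b ≠ []) (hh ww : Int) (i k : Nat) :
    pvBuild b hh ww (i + 6 * b.length) k = pvBuild b hh ww i k := by
  simp only [pvBuild]
  apply List.map_congr_left
  intro j _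
  rw [show i + 6 * b.length + j = (i + j) + 6 * b.length by ring]
  exact pvElem_period b hb hh ww (i + j)

-- one shift-level block of the table equals the corresponding slice of the output stream
lemma pvBlock (b : List (Int × Int × Int × Int)) (hh ww : Int) (s : Nat) :
    pvBuild b hh ww (s * b.length) b.length = b.map (fun p => pvShiftTuple hh ww p (s : Int)) := by
  apply List.ext_getElem
  · simp [pvBuild]
  · intro j h1 h2
    have hj : j < b.length := by simpa [pvBuild] using h1
    have hm : (s * b.length + j) % b.length = j := by
      rw [show s * b.length + j = j + b.length * s by ring, Nat.add_mul_mod_self_left,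
        Nat.mod_eq_of_lt hj]
    have hd : (s * b.length + j) / b.length = s := by
      rw [show s * b.length + j = j + b.length * s by ring,
        Nat.add_mul_div_left _ _ (by omega : 0 < b.length), Nat.div_eq_of_lt hj]
      omega
    simp only [pvBuild, List.getElem_map, List.getElem_range, pvElem, hm, hd]
    simp [List.getElem?_eq_getElem hj]

lemma pvBuild_blocks (b : List (Int × Int × Int × Int)) (hh ww : Int) :
    ∀ m : Nat, pvBuild b hh ww 0 (m * b.length) =
      (List.range m).flatMap (fun s : Nat => b.map (fun p => pvShiftTuple hh ww p (s : Int))) := by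
  intro m
  induction m with
  | zero => simp [pvBuild]
  | succ m ih =>
    rw [show (m + 1) * b.length = m * b.length + b.length by ring, pvBuild_add, ih,
      List.range_succ, List.flatMap_append]
    simp [pvBlock]

lemma pvTable_eq (b : List (Int × Int × Int × Int)) (hh ww : Int) :
    (PySem.List.pyRange 0 6 1).flatMap (fun shift => b.map (fun p => pvShiftTuple hh ww p shift))
      = pvBuild b hh ww 0 (6 * b.length) := by
  rw [PySem.List.pyRange_one, List.flatMap_map, pvBuild_blocks b hh ww 6]
  norm_num [Function.comp]
  rfl

lemma pvTile (b : List (Int × Int × Int × Int)) (hb : b ≠ []) (hh ww : Int) :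
    ∀ r : Nat, (List.replicate r (pvBuild b hh ww 0 (6 * b.length))).flatten
      = pvBuild b hh ww 0 (r * (6 * b.length)) := by
  intro r
  induction r with
  | zero => simp [pvBuild]
  | succ r ih =>
    rw [List.replicate_succ, List.flatten_cons, ih,
      show (r + 1) * (6 * b.length) = 6 * b.length + r * (6 * b.length) by ring,
      pvBuild_add]
    congr 1
    exact (pvBuild_period b hb hh ww 0 _).symm

lemma pvTake (b : List (Int × Int × Int × Int)) (hh ww : Int) (n m : Nat) (h : n ≤ m) :
    (pvBuild b hh ww 0 m).take n = pvBuild b hh ww 0 n := by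
  rw [show m = n + (m - n) by omega, pvBuild_add]
  have hlen : (pvBuild b hh ww 0 n).length = n := by simp [pvBuild]
  simp [hlen]

-- ===== VERDICT (by name: the statement is the Claim_ definition above) =====
theorem expand_starts_spec : Claim_equal_expand_starts := by
  intro b N hh ww _ hpre
  unfold Spec_expand_starts expand_starts expand_starts_alt
  by_cases hN : N ≤ 0
  · rw [if_pos hN, show N.toNat = 0 by omega]
    rfl
  · rw [if_neg hN]
    have hb : b ≠ [] := by
      rcases hpre with h | h
      · omega
      · exact h
    have hL : 0 < b.length := List.length_pos_of_ne_nil hb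
    have hA := expand_starts_loop_eq b hb N hh ww N.toNat [] (by simp)
    simp only [List.length_nil, Nat.cast_zero, Int.sub_zero, List.nil_append] at hA
    rw [hA, pvTable_eq]
    show pvBuild b hh ww 0 N.toNat =
      PySem.List.slice
        (List.replicate
          (PySem.Int.floordiv N (((pvBuild b hh ww 0 (6 * b.length)).length : Nat) : Int) + 1).toNat
          (pvBuild b hh ww 0 (6 * b.length))).flatten none (some N)
    have hlen6 : (pvBuild b hh ww 0 (6 * b.length)).length = 6 * b.length := by
      simp [pvBuild]
    rw [hlen6]
    have hNn : N = ((N.toNat : Nat) : Int) := by omega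
    have hreps : ((((N.toNat / (6 * b.length) : Nat) : Int)) + 1).toNat
        = N.toNat / (6 * b.length) + 1 := by
      rw [show (((N.toNat / (6 * b.length) : Nat) : Int) + 1)
          = (((N.toNat / (6 * b.length) + 1 : Nat)) : Int) by push_cast; ring,
        Int.toNat_natCast]
    rw [hNn]
    simp only [Int.toNat_natCast]
    rw [PySem.Int.floordiv_natCast, hreps, PySem.List.slice_to_natCast, pvTile b hb hh ww]
    have hle : N.toNat ≤ (N.toNat / (6 * b.length) + 1) * (6 * b.length) := by
      have h1 := Nat.div_add_mod N.toNat (6 * b.length)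
      have h2 : N.toNat % (6 * b.length) < 6 * b.length := Nat.mod_lt _ (by omega)
      nlinarith
    rw [pvTake b hh ww N.toNat _ hle]
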